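-- pv_equiv track=rewrite | github.com/Juhil3001/IntelliSys | backend/app/modules/monitoring/path_match.py | find_best_api
-- ===== SOURCE A (Python) =====
-- def path_matches_template(template: str, actual: str) -> bool:
--     template = template.split("?")[0].strip()
--     actual = actual.split("?")[0].strip()
--     if template == actual:
--         return True
--     ta = [x for x in template.strip("/").split("/") if x or template.strip() == ""]
--     aa = [x for x in actual.strip("/").split("/") if x or actual.strip() == ""]
--     if not ta and not aa:
--         return True
--     if len(ta) != len(aa):
--         return False
--     for t, a in zip(ta, aa, strict=True):
--         if t.startswith("{") and t.endswith("}"):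
--             continue
--         if t != a:
--             return False
--     return True
--
-- def find_best_api(
--     method: str,
--     path: str,
--     routes: list[tuple[int, str, str]],
-- ) -> int | None:
--     """
--     routes: list of (api_id, http_method, endpoint_template)
--     Prefer exact path match, then first template match.
--     """
--     method_u = method.upper()
--     exact = None
--     templ = None
--     for api_id, m, ep in routes:
--         if m.upper() != method_u:
--             continue
--         if ep == path:
--             exact = api_id
--             break
--         if path_matches_template(ep, path):
--             templ = api_id
--     return exact if exact is not None else templ
-- ===== SOURCE B (Python) =====
-- def _segments(s):
--     # s is already query-stripped and whitespace-stripped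
--     return [x for x in s.strip("/").split("/") if x or s.strip() == ""]
--
-- def _seg_ok(t, a):
--     return t == a or (t.startswith("{") and t.endswith("}"))
--
-- def path_matches_template(template: str, actual: str) -> bool:
--     tn = template.split("?")[0].strip()
--     an = actual.split("?")[0].strip()
--     ts = _segments(tn)
--     aa = _segments(an)
--     return tn == an or (len(ts) == len(aa)
--                         and all(_seg_ok(t, a) for t, a in zip(ts, aa)))
--
-- def find_best_api(method, path, routes):
--     mu = method.upper()
--     cands = [(api_id, ep) for api_id, m, ep in routes if m.upper() == mu]
--     for api_id, ep in cands:
--         if ep == path: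
--             return api_id
--     best = None
--     for api_id, ep in cands:
--         if path_matches_template(ep, path):
--             best = api_id
--     return best
-- ===== Notes on version B (the rewrite author's own statement) =====
-- stated objective: simpler
-- what changed: B pre-filters the routes by method once and then runs two plain passes over the candidates (first exact match, then last template match), and path_matches_template is flattened from an early-return branch chain into one boolean formula over normalized-string equality and a segment-wise all().
import Mathlib
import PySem

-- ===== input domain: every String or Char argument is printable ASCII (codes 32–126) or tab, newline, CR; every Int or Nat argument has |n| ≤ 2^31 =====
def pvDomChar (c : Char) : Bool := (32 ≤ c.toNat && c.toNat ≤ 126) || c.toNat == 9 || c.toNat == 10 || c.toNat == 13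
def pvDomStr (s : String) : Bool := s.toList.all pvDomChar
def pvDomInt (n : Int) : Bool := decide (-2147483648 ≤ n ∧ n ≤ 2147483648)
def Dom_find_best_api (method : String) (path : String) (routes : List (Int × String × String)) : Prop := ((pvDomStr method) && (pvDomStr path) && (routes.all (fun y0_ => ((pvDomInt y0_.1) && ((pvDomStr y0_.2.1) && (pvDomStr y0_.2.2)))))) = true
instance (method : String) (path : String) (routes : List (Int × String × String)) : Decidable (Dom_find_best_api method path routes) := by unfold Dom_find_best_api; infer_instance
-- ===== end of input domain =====

-- B pre-filters routes by method and runs two plain passes (first exact match, then last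
-- template match), with the template test flattened to one boolean formula. Objective: simpler.

-- ===== PORT A =====
-- literal port of A's path_matches_template: early-return branch chain with an explicit loop
def pmt_loop : List (String × String) → Bool
  | [] => true
  | (t, a) :: rest =>
    if PySem.Str.startswith t "{" && PySem.Str.endswith t "}" then pmt_loop rest
    else if t ≠ a then false
    else pmt_loop rest

def path_matches_template (template : String) (actual : String) : Bool :=
  let template := PySem.Str.strip (((PySem.Str.split? template "?").getD []).headD "")
  let actual := PySem.Str.strip (((PySem.Str.split? actual "?").getD []).headD "")
  if template == actual then true
  else
    let ta := ((PySem.Str.split? (PySem.Str.stripChars template "/") "/").getD []).filter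
      (fun x => x != "" || PySem.Str.strip template == "")
    let aa := ((PySem.Str.split? (PySem.Str.stripChars actual "/") "/").getD []).filter
      (fun x => x != "" || PySem.Str.strip actual == "")
    if ta.isEmpty && aa.isEmpty then true
    else if ta.length ≠ aa.length then false
    else pmt_loop (ta.zip aa)

-- A's single fused for-loop: templ is the running fallback; an exact match breaks
def findA_loop (method_u : String) (path : String) :
    List (Int × String × String) → Option Int → Option Int
  | [], templ => templ
  | (api_id, m, ep) :: rest, templ =>
    if PySem.Str.upper m ≠ method_u then findA_loop method_u path rest templ
    else if ep == path then some api_id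
    else if path_matches_template ep path then findA_loop method_u path rest (some api_id)
    else findA_loop method_u path rest templ

def find_best_api (method : String) (path : String) (routes : List (Int × String × String)) : Option Int :=
  let method_u := PySem.Str.upper method
  findA_loop method_u path routes none

-- ===== PORT B =====
-- Source B's _segments: s is already query- and whitespace-stripped
def segB (s : String) : List String :=
  ((PySem.Str.split? (PySem.Str.stripChars s "/") "/").getD []).filter
    (fun x => x != "" || PySem.Str.strip s == "")

-- Source B's _seg_ok
def segOk (t a : String) : Bool :=
  t == a || (PySem.Str.startswith t "{" && PySem.Str.endswith t "}")

def path_matches_template_alt (template : String) (actual : String) : Bool :=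
  let tn := PySem.Str.strip (((PySem.Str.split? template "?").getD []).headD "")
  let an := PySem.Str.strip (((PySem.Str.split? actual "?").getD []).headD "")
  let ts := segB tn
  let aa := segB an
  tn == an || (ts.length == aa.length && (ts.zip aa).all (fun p => segOk p.1 p.2))

def find_best_api_alt (method : String) (path : String) (routes : List (Int × String × String)) : Option Int :=
  let mu := PySem.Str.upper method
  let cands := (routes.filter (fun r => PySem.Str.upper r.2.1 == mu)).map (fun r => (r.1, r.2.2))
  match cands.find? (fun c => c.2 == path) with
  | some c => some c.1
  | none =>
    cands.foldl (fun best c => if path_matches_template_alt c.2 path then some c.1 else best) none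

-- ===== PRECONDITION & SPEC =====
def Spec_find_best_api (method : String) (path : String) (routes : List (Int × String × String)) (out : Option Int) : Prop := out = find_best_api_alt method path routes
instance (method : String) (path : String) (routes : List (Int × String × String)) (out : Option Int) : Decidable (Spec_find_best_api method path routes out) := by unfold Spec_find_best_api; infer_instance

-- ===== CLAIM (what is proved, stated in full; the proofs are below) =====
def Claim_equal_find_best_api : Prop := ∀ (method : String) (path : String) (routes : List (Int × String × String)), Dom_find_best_api method path routes → Spec_find_best_api method path routes (find_best_api method path routes)

-- ===== LEMMAS AND PROOFS =====

theorem pmt_loop_eq_all (l : List (String × String)) :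
    pmt_loop l = l.all (fun p => segOk p.1 p.2) := by
  induction l with
  | nil => rfl
  | cons h rest ih =>
    obtain ⟨t, a⟩ := h
    rw [pmt_loop, ih, List.all_cons]
    by_cases hw : (PySem.Str.startswith t "{" && PySem.Str.endswith t "}") = true
    · rw [if_pos hw]
      unfold segOk
      rw [hw]
      simp
    · rw [if_neg hw]
      have hw' : (PySem.Str.startswith t "{" && PySem.Str.endswith t "}") = false := by
        simpa using hw
      unfold segOk
      rw [hw']
      by_cases he : t = a
      · rw [if_neg (not_not_intro he)]
        simp [he]
      · rw [if_pos he]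
        simp [he]

-- the branch chain of A's template test, as one boolean formula (B's shape)
theorem pmt_core (c : Bool) (ta aa : List String) :
    (if c then true
     else if ta.isEmpty && aa.isEmpty then true
     else if ta.length ≠ aa.length then false
     else pmt_loop (ta.zip aa))
    = (c || (ta.length == aa.length && (ta.zip aa).all fun p => segOk p.1 p.2)) := by
  cases c
  · simp only [Bool.false_eq_true, if_false, Bool.false_or]
    rcases ta with _ | ⟨x, ta'⟩
    · rcases aa with _ | ⟨y, aa'⟩
      · simp
      · simp [List.isEmpty]
    · rcases aa with _ | ⟨y, aa'⟩
      · simp [List.isEmpty]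
      · by_cases hlen : (x :: ta').length = (y :: aa').length
        · simp [hlen, pmt_loop_eq_all, List.isEmpty]
        · have h' : ta'.length ≠ aa'.length := by simpa using hlen
          simp [h', List.isEmpty]
  · simp

theorem pmt_eq (template actual : String) :
    path_matches_template template actual = path_matches_template_alt template actual := by
  unfold path_matches_template path_matches_template_alt segB
  exact pmt_core _ _ _

theorem findA_loop_eq (mu path : String) :
    ∀ (rs : List (Int × String × String)) (templ : Option Int),
    findA_loop mu path rs templ =
      (let cands := (rs.filter (fun r => PySem.Str.upper r.2.1 == mu)).map (fun r => (r.1, r.2.2));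
       match cands.find? (fun c => c.2 == path) with
       | some c => some c.1
       | none =>
         cands.foldl (fun best c => if path_matches_template_alt c.2 path then some c.1 else best) templ) := by
  intro rs
  induction rs with
  | nil => intro templ; simp [findA_loop]
  | cons h rest ih =>
    intro templ
    obtain ⟨api_id, m, ep⟩ := h
    by_cases hm : PySem.Str.upper m = mu
    · by_cases hep : ep = path
      · simp [findA_loop, hm, hep]
      · have hbe : (ep == path) = false := by simp [hep]
        by_cases ht : path_matches_template ep path = true
        · have ht' : path_matches_template_alt ep path = true := by rw [← pmt_eq]; exact ht
          rw [findA_loop]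
          simp only [hm, ne_eq, not_true_eq_false, if_false, hbe, ht, if_true, Bool.false_eq_true,
            List.filter_cons, beq_self_eq_true, if_true, List.map_cons, List.find?_cons,
            List.foldl_cons, ht']
          exact ih (some api_id)
        · have ht' : path_matches_template_alt ep path = false := by
            rw [← pmt_eq]; simpa using ht
          rw [findA_loop]
          have htb : path_matches_template ep path = false := by simpa using ht
          simp only [hm, ne_eq, not_true_eq_false, if_false, hbe, htb, Bool.false_eq_true,
            List.filter_cons, beq_self_eq_true, if_true, List.map_cons, List.find?_cons,
            List.foldl_cons, ht']
          exact ih templ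
    · have hbm : (PySem.Str.upper m == mu) = false := by simp [hm]
      rw [findA_loop]
      simp only [hm, ne_eq, not_false_eq_true, if_true, List.filter_cons, hbm, Bool.false_eq_true,
        if_false]
      exact ih templ

-- ===== VERDICT (by name: the statement is the Claim_ definition above) =====
theorem find_best_api_spec : Claim_equal_find_best_api := by
  intro method path routes _
  unfold Spec_find_best_api find_best_api find_best_api_alt
  rw [findA_loop_eq]
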